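-- pv_equiv track=rewrite | github.com/gbud/Fundamentals-of-CS-and-Programming | week11_midterm2/practice_midterm2.py | evensAreSortedWrapper
-- ===== SOURCE A (Python) =====
-- def evensAreSortedWrapper(L, lastEven):
--     if L == []: return True
--     else:
--         if L[0] % 2 == 1:
--             return evensAreSortedWrapper(L[1:], lastEven)
--         elif L[0] % 2 == 0:
--             if L[0] > lastEven:
--                 lastEven = L[0]
--                 return evensAreSortedWrapper(L[1:], lastEven)
--             else: return False
-- ===== SOURCE B (Python) =====
-- def evensAreSortedWrapper(L, lastEven):
--     evens = [lastEven] + [x for x in L if x % 2 == 0]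
--     return all(a < b for a, b in zip(evens, evens[1:]))
-- ===== Notes on version B (the rewrite author's own statement) =====
-- stated objective: simpler
-- what changed: Replaces A's compare-while-recursing (threading lastEven through recursive calls with per-element branching) by filtering the evens into one list seeded with lastEven and checking adjacent pairs with zip/all.
import Mathlib
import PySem

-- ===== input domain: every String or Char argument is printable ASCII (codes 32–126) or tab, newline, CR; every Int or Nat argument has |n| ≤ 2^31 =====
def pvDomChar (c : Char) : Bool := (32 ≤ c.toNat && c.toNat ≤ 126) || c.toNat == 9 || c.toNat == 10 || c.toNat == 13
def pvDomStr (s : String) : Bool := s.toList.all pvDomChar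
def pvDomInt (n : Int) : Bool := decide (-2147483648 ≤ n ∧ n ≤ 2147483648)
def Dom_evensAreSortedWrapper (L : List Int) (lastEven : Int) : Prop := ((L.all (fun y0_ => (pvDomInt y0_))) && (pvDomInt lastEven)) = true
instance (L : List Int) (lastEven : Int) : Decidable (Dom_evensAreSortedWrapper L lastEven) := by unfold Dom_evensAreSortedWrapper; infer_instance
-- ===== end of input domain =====

-- B builds the even sublist seeded with lastEven in one pass and checks adjacent pairs; simpler than A's recursion threading lastEven.

-- ===== PORT A =====
def evensAreSortedWrapper (L : List Int) (lastEven : Int) : Bool :=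
  match L with
  | [] => true
  | x :: rest =>
    if x % 2 == 1 then evensAreSortedWrapper rest lastEven
    else if x % 2 == 0 then
      if x > lastEven then evensAreSortedWrapper rest x
      else false
    else true  -- unreachable for Int inputs (x % 2 ∈ {0, 1})

-- ===== PORT B =====
def evensAreSortedWrapper_alt (L : List Int) (lastEven : Int) : Bool :=
  let evens := lastEven :: L.filter (fun x => x % 2 == 0)
  (evens.zip evens.tail).all (fun p => p.1 < p.2)

-- ===== PRECONDITION & SPEC =====
def Spec_evensAreSortedWrapper (L : List Int) (lastEven : Int) (out : Bool) : Prop := out = evensAreSortedWrapper_alt L lastEven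
instance (L : List Int) (lastEven : Int) (out : Bool) : Decidable (Spec_evensAreSortedWrapper L lastEven out) := by unfold Spec_evensAreSortedWrapper; infer_instance

-- ===== CLAIM (what is proved, stated in full; the proofs are below) =====
def Claim_equal_evensAreSortedWrapper : Prop := ∀ (L : List Int) (lastEven : Int), Dom_evensAreSortedWrapper L lastEven → Spec_evensAreSortedWrapper L lastEven (evensAreSortedWrapper L lastEven)

-- ===== LEMMAS AND PROOFS =====

lemma evens_agree (L : List Int) (le : Int) :
    evensAreSortedWrapper L le = evensAreSortedWrapper_alt L le := by
  induction L generalizing le with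
  | nil => rfl
  | cons x rest ih =>
    have hmod : x % 2 = 0 ∨ x % 2 = 1 := by omega
    rcases hmod with h0 | h1
    · simp only [evensAreSortedWrapper, h0]
      by_cases hlt : x > le
      · rw [if_neg (by decide), if_pos (by decide), if_pos hlt, ih x]
        simp [evensAreSortedWrapper_alt, h0, hlt]
      · rw [if_neg (by decide), if_pos (by decide), if_neg hlt]
        simp only [evensAreSortedWrapper_alt, List.filter_cons, h0]
        simp
        intro h; omega
    · simp only [evensAreSortedWrapper, evensAreSortedWrapper_alt, List.filter_cons, h1]
      rw [if_pos (by decide)]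
      simp only [show ((1:Int) == 0) = false by decide, Bool.false_eq_true, if_false]
      exact ih le

-- ===== VERDICT (by name: the statement is the Claim_ definition above) =====
theorem evensAreSortedWrapper_spec : Claim_equal_evensAreSortedWrapper := by
  intro L le _
  unfold Spec_evensAreSortedWrapper
  exact evens_agree L le
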